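-- pv_equiv track=rewrite | github.com/AN-Sippo/Comprog | leetcode/667.py | constructArray
-- ===== SOURCE A (Python) =====
-- from collections import deque
--
-- def constructArray(n: int, k: int) -> list[int]:
--     if k == 1:
--         return list(range(1, n + 1))
--
--     l = deque(range(1, n + 1))
--
--     ans = []
--     from_left = True
--     while True:
--         if len(ans) == k:
--             if not from_left:
--                 while l:
--                     ans.append(l.popleft())
--                 break
--             else:
--                 while l:
--                     ans.append(l.pop())
--                 break
--
--         if from_left:
--             ans.append(l.popleft())
--             from_left = False
--         else:
--             ans.append(l.pop())
--             from_left = True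
--
--     return ans
-- ===== SOURCE B (Python) =====
-- def constructArray(n: int, k: int) -> list[int]:
--     if k == 1:
--         return list(range(1, n + 1))
--     head = [i // 2 + 1 if i % 2 == 0 else n - i // 2 for i in range(k)]
--     lo = k - k // 2 + 1
--     hi = n - k // 2
--     tail = list(range(lo, hi + 1))
--     if k % 2 == 0:
--         tail.reverse()
--     return head + tail
-- ===== Notes on version B (the rewrite author's own statement) =====
-- stated objective: simpler
-- what changed: B replaces A's deque with alternating popleft/pop and the final dump loop by a closed-form index map for the first k elements plus one contiguous range (reversed iff k is even) for the tail.
import Mathlib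
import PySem

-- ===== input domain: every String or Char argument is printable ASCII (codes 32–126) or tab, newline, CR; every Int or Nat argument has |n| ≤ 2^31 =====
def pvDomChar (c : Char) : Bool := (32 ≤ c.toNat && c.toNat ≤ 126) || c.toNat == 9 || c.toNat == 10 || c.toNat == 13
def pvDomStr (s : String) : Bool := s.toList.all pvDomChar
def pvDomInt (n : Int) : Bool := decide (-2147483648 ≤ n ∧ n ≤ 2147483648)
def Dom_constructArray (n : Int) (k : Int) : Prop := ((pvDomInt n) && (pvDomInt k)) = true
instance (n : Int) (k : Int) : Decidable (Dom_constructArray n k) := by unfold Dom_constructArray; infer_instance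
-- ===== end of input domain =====

-- B builds the answer by a closed-form index map (head) plus one contiguous range, reversed iff
-- k is even (tail), instead of A's element-by-element deque simulation; objective: simpler.

-- ===== PORT A =====
-- A's main 'while True' loop: state (l, ans, from_left); the two final dump loops become
-- 'ans ++ l' (popleft dump) and 'ans ++ l.reverse' (pop dump).  On an empty deque Python's
-- popleft/pop would raise IndexError; there the recursion returns ans (excluded by Pre_).
def loopA (k : Int) (l : List Int) (ans : List Int) (from_left : Bool) : List Int :=
  if (ans.length : Int) = k then
    if from_left then ans ++ l.reverse else ans ++ l
  else
    match l with
    | [] => ans  -- Python raises IndexError here; outside Pre_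
    | x :: xs =>
      if from_left then loopA k xs (ans ++ [x]) false
      else loopA k ((x :: xs).dropLast) (ans ++ [(x :: xs).getLast (by simp)]) true
termination_by l.length
decreasing_by
  · simp
  · simp [List.length_dropLast]

def constructArray (n : Int) (k : Int) : List Int :=
  if k = 1 then PySem.List.pyRange 1 (n + 1) 1
  else loopA k (PySem.List.pyRange 1 (n + 1) 1) [] true

-- ===== PORT B =====
def constructArray_alt (n : Int) (k : Int) : List Int :=
  if k = 1 then PySem.List.pyRange 1 (n + 1) 1
  else
    let head := (PySem.List.pyRange 0 k 1).map (fun i =>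
      if PySem.Int.mod i 2 = 0 then PySem.Int.floordiv i 2 + 1 else n - PySem.Int.floordiv i 2)
    let lo := k - PySem.Int.floordiv k 2 + 1
    let hi := n - PySem.Int.floordiv k 2
    let tail := PySem.List.pyRange lo (hi + 1) 1
    head ++ (if PySem.Int.mod k 2 = 0 then tail.reverse else tail)

-- ===== PRECONDITION & SPEC =====
-- Pre_ admits exactly the inputs on which A returns normally: k = 1 (any n), k = 0 (any n; A
-- dumps the whole deque immediately), or 0 ≤ k ≤ n; for any other k the deque is exhausted
-- before k elements are placed and A's popleft/pop raises IndexError.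
def Pre_constructArray (n : Int) (k : Int) : Prop := k = 1 ∨ k = 0 ∨ (0 ≤ k ∧ k ≤ n)
instance (n : Int) (k : Int) : Decidable (Pre_constructArray n k) := by
  unfold Pre_constructArray; infer_instance
def pvWitness_constructArray : Int × Int := (6, 3)
def Spec_constructArray (n : Int) (k : Int) (out : List Int) : Prop := out = constructArray_alt n k
instance (n : Int) (k : Int) (out : List Int) : Decidable (Spec_constructArray n k out) := by
  unfold Spec_constructArray; infer_instance

-- ===== CLAIM (what is proved, stated in full; the proofs are below) =====
def Claim_equal_constructArray : Prop := ∀ (n : Int) (k : Int), Dom_constructArray n k → Pre_constructArray n k → Spec_constructArray n k (constructArray n k)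

-- ===== LEMMAS AND PROOFS =====

-- common intermediate form: the alternating construction, by number of remaining steps
def build (m : Nat) (a b : Int) (fl : Bool) : List Int :=
  match m, fl with
  | 0, true => (PySem.List.pyRange a (b + 1) 1).reverse
  | 0, false => PySem.List.pyRange a (b + 1) 1
  | m + 1, true => a :: build m (a + 1) b false
  | m + 1, false => b :: build m a (b - 1) true

lemma seg_cons {a b : Int} (h : a ≤ b) :
    PySem.List.pyRange a (b + 1) 1 = a :: PySem.List.pyRange (a + 1) (b + 1) 1 :=
  PySem.List.pyRange_one_cons (by omega)

lemma seg_snoc {a b : Int} (h : a ≤ b) :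
    PySem.List.pyRange a (b + 1) 1 = PySem.List.pyRange a b 1 ++ [b] := by
  rw [PySem.List.pyRange_one_append a b (b + 1) h (by omega), PySem.List.pyRange_one_singleton]

lemma loopA_stop {k : Int} {l ans : List Int} {fl : Bool} (h : (ans.length : Int) = k) :
    loopA k l ans fl = if fl then ans ++ l.reverse else ans ++ l := by
  rw [loopA.eq_def, if_pos h]

lemma loopA_left {k x : Int} {xs ans : List Int} (h : ¬(ans.length : Int) = k) :
    loopA k (x :: xs) ans true = loopA k xs (ans ++ [x]) false := by
  rw [loopA.eq_def]; simp [h]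

lemma loopA_right {k : Int} {l ans : List Int} (h : ¬(ans.length : Int) = k) (hl : l ≠ []) :
    loopA k l ans false = loopA k l.dropLast (ans ++ [l.getLast hl]) true := by
  cases l with
  | nil => exact absurd rfl hl
  | cons x xs => rw [loopA.eq_def]; simp [h]

lemma loopA_eq_build : ∀ (m : Nat) (a b k : Int) (ans : List Int) (fl : Bool),
    (ans.length : Int) + m = k → ((m : Int) ≤ b - a + 1 ∨ m = 0) →
    loopA k (PySem.List.pyRange a (b + 1) 1) ans fl = ans ++ build m a b fl := by
  intro m
  induction m with
  | zero =>
    intro a b k ans fl hk _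
    simp only [Nat.cast_zero, add_zero] at hk
    rw [loopA_stop hk]
    cases fl <;> simp [build]
  | succ m ih =>
    intro a b k ans fl hk hm
    have hm' : ((m : Int) + 1) ≤ b - a + 1 := by
      rcases hm with hm | hm
      · push_cast at hm; omega
      · omega
    have hab : a ≤ b := by omega
    have hne : ¬(ans.length : Int) = k := by push_cast at hk; omega
    cases fl with
    | true =>
      rw [seg_cons hab, loopA_left hne,
          ih (a + 1) b k (ans ++ [a]) false (by push_cast at hk ⊢; simp; omega)
            (Or.inl (by omega))]
      simp [build]
    | false =>
      rw [loopA_right hne (by rw [seg_cons hab]; simp)]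
      have h1 : (PySem.List.pyRange a (b + 1) 1).dropLast = PySem.List.pyRange a b 1 := by
        rw [seg_snoc hab]; exact List.dropLast_concat
      have h2 : ∀ hl, (PySem.List.pyRange a (b + 1) 1).getLast hl = b := by
        intro hl
        have h3 : (PySem.List.pyRange a (b + 1) 1).getLast? = some b := by
          rw [seg_snoc hab]; simp
        exact Option.some_inj.mp ((List.getLast?_eq_some_getLast hl).symm.trans h3)
      rw [h1, h2]
      have hb' : PySem.List.pyRange a b 1 = PySem.List.pyRange a (b - 1 + 1) 1 := by norm_num
      rw [hb', ih a (b - 1) k (ans ++ [b]) true (by push_cast at hk ⊢; simp; omega)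
            (Or.inl (by omega))]
      simp [build]

-- B's head-map plus tail equals 'build', generalized over the start index j of the head map
lemma alt_eq_build (n k : Int) :
    ∀ (m : Nat) (j : Int), 0 ≤ j → j + m = k →
    ((PySem.List.pyRange j k 1).map (fun i =>
        if PySem.Int.mod i 2 = 0 then PySem.Int.floordiv i 2 + 1 else n - PySem.Int.floordiv i 2)
      ++ (if PySem.Int.mod k 2 = 0
            then (PySem.List.pyRange (k - PySem.Int.floordiv k 2 + 1) (n - PySem.Int.floordiv k 2 + 1) 1).reverse
            else PySem.List.pyRange (k - PySem.Int.floordiv k 2 + 1) (n - PySem.Int.floordiv k 2 + 1) 1))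
    = build m (j - PySem.Int.floordiv j 2 + 1) (n - PySem.Int.floordiv j 2)
        (decide (PySem.Int.mod j 2 = 0)) := by
  intro m
  induction m with
  | zero =>
    intro j hj hjk
    have hjk' : j = k := by push_cast at hjk; omega
    subst hjk'
    rw [PySem.List.pyRange_one_eq_nil le_rfl, List.map_nil, List.nil_append]
    by_cases h : PySem.Int.mod j 2 = 0
    · rw [if_pos h, decide_eq_true h]; rfl
    · rw [if_neg h, decide_eq_false h]; rfl
  | succ m ih =>
    intro j hj hjk
    have hjlt : j < k := by push_cast at hjk; omega
    rw [PySem.List.pyRange_one_cons hjlt]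
    simp only [List.map_cons, List.cons_append]
    rw [ih (j + 1) (by omega) (by push_cast at hjk ⊢; omega)]
    have hmod : PySem.Int.mod j 2 = j % 2 := PySem.Int.mod_eq_emod_of_pos (by norm_num)
    have hmod1 : PySem.Int.mod (j + 1) 2 = (j + 1) % 2 := PySem.Int.mod_eq_emod_of_pos (by norm_num)
    have hdiv : PySem.Int.floordiv j 2 = j / 2 := PySem.Int.floordiv_eq_ediv_of_pos (by norm_num)
    have hdiv1 : PySem.Int.floordiv (j + 1) 2 = (j + 1) / 2 := PySem.Int.floordiv_eq_ediv_of_pos (by norm_num)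
    rw [hmod, hmod1, hdiv, hdiv1]
    by_cases h : j % 2 = 0
    · have he : (j + 1) % 2 = 1 := by omega
      have hd1 : (j + 1) / 2 = j / 2 := by omega
      rw [he, hd1]
      simp only [h, decide_true, if_pos]
      have ha : j + 1 - j / 2 + 1 = j - j / 2 + 1 + 1 := by omega
      have hv : j / 2 + 1 = j - j / 2 + 1 := by omega
      rw [ha, hv]
      simp [build]
    · have he : (j + 1) % 2 = 0 := by omega
      have hd1 : (j + 1) / 2 = j / 2 + 1 := by omega
      rw [he, hd1]
      simp only [h, decide_false, if_neg, decide_true, not_false_eq_true]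
      have ha : j + 1 - (j / 2 + 1) + 1 = j - j / 2 + 1 := by omega
      have hb : n - (j / 2 + 1) = n - j / 2 - 1 := by omega
      rw [ha, hb]
      simp [build]

-- ===== VERDICT (by name: the statement is the Claim_ definition above) =====
theorem constructArray_spec : Claim_equal_constructArray := by
  intro n k _ hpre
  unfold Spec_constructArray constructArray constructArray_alt
  by_cases hk1 : k = 1
  · simp [hk1]
  · rw [if_neg hk1, if_neg hk1]
    have hk0 : 0 ≤ k := by rcases hpre with h | h | h <;> omega
    have htn : (k.toNat : Int) = k := Int.toNat_of_nonneg hk0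
    have hA := loopA_eq_build k.toNat 1 n k [] true (by simpa using htn)
      (by rcases hpre with h | h | h
          · exact absurd h hk1
          · right; omega
          · left; omega)
    norm_num at hA
    rw [hA]
    have hB := alt_eq_build n k k.toNat 0 le_rfl (by simpa using htn)
    have hz0 : PySem.Int.floordiv 0 2 = 0 := by decide
    have hz1 : PySem.Int.mod 0 2 = 0 := by decide
    rw [hz0, hz1, show ((0:Int) - 0 + 1) = 1 from by norm_num,
        show (n - (0:Int)) = n from by norm_num,
        show decide ((0:Int) = 0) = true from by decide] at hB
    exact hB.symm
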